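-- pv_equiv track=rewrite | github.com/Franco2607/Logica-de-programacion | Parte 4/08. BatmanDay.py | sistema_seguridad_baticueva
-- ===== SOURCE A (Python) =====
-- def sum_alert_cuadricula(sensores, center_x, center_y) -> int:
--
--     total = 0
--
--     for x in range(center_x - 1, center_x + 2):
--         for y in range(center_y - 1, center_y + 2):
--             for sensor in sensores:
--                 if sensor[0] == x and sensor[1] == y:
--                     total += sensor[2]
--
--     return total
--
-- def sistema_seguridad_baticueva(sensores):
--
--     nivel_max_alerta = 0
--     cordenada_max_alerta = (0, 0)
--
--     for x in range(1, 19):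
--         for y in range(1, 19):
--             nivel_de_alerta = sum_alert_cuadricula(sensores, x, y)
--             if nivel_de_alerta > nivel_max_alerta:
--                 nivel_max_alerta = nivel_de_alerta
--                 cordenada_max_alerta = (x, y)
-- # "abs" Valor absoluto
--     distancia = abs(cordenada_max_alerta[0]) + abs(cordenada_max_alerta[1])
--     activar_protocolo = nivel_max_alerta > 20
--
--     return cordenada_max_alerta, nivel_max_alerta, distancia, activar_protocolo
-- ===== SOURCE B (Python) =====
-- def sistema_seguridad_baticueva(sensores):
--     # Scatter pass: each sensor adds its value to the 9 candidate centers around it.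
--     acc = {}
--     for sensor in sensores:
--         sx, sy, val = sensor[0], sensor[1], sensor[2]
--         for dx in (-1, 0, 1):
--             for dy in (-1, 0, 1):
--                 cell = (sx + dx, sy + dy)
--                 acc[cell] = acc.get(cell, 0) + val
--     # Selection: no 18x18 scan; pick directly among the positive accumulated cells
--     # inside the grid: max level, then smallest x, then smallest y (A's row-major
--     # first-hit with strict > and initial max 0 is exactly this).
--     cand = [(xy, v) for xy, v in acc.items()
--             if 1 <= xy[0] <= 18 and 1 <= xy[1] <= 18 and v > 0]
--     if cand:
--         nivel = max(v for _, v in cand)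
--         x0 = min(xy[0] for xy, v in cand if v == nivel)
--         y0 = min(xy[1] for xy, v in cand if v == nivel and xy[0] == x0)
--         coord = (x0, y0)
--     else:
--         nivel = 0
--         coord = (0, 0)
--     distancia = abs(coord[0]) + abs(coord[1])
--     return coord, nivel, distancia, nivel > 20
-- ===== Notes on version B (the rewrite author's own statement) =====
-- stated objective: faster
-- what changed: B replaces A's 324-center gather (each re-scanning all sensors over a 3x3 window) and A's full-grid max loop by one scatter pass over the sensors into a dict of the 9 surrounding centers per sensor, then selects the answer directly from the positive in-grid dict entries via max level / min x / min y (equal to A's row-major strict-> scan), never iterating the 18x18 grid.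
-- outside the precondition, e.g. on sistema_seguridad_baticueva([[99]]): A returns ((0, 0), 0, 0, False), B raises IndexError
import Mathlib
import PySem

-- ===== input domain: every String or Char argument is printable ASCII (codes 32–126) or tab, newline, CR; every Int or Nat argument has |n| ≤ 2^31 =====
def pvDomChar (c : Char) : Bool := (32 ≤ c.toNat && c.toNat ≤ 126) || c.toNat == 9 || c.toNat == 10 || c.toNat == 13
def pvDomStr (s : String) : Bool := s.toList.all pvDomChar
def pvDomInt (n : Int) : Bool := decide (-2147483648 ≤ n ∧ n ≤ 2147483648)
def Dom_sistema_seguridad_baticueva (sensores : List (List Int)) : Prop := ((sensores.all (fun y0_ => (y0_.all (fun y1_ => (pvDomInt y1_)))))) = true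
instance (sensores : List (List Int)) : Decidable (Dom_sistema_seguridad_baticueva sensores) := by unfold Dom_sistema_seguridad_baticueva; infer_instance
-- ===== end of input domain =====

-- B replaces A's per-center gather and full 18x18 max scan by one scatter pass into a dict
-- followed by a direct max-level / min-x / min-y selection over the positive in-grid entries
-- (faster by a large constant factor, measured).
-- Pre_ excludes sensor rows shorter than 3 (Python A raises IndexError there, except when
-- short-circuit comparison hides the missing element; B always indexes all three).


-- ===== PORT A =====
-- sum_alert_cuadricula: triple loop, outer two over the 3x3 window, inner over all sensors
def pvSumAlert (sensores : List (List Int)) (cx cy : Int) : Int :=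
  (PySem.List.pyRange (cx - 1) (cx + 2) 1).foldl (fun total x =>
    (PySem.List.pyRange (cy - 1) (cy + 2) 1).foldl (fun total y =>
      sensores.foldl (fun total sensor =>
        if PySem.List.pyGetD sensor 0 0 = x ∧ PySem.List.pyGetD sensor 1 0 = y then
          total + PySem.List.pyGetD sensor 2 0
        else total) total) total) 0

def sistema_seguridad_baticueva (sensores : List (List Int)) : (Int × Int) × Int × Int × Bool :=
  let st :=
    (PySem.List.pyRange 1 19 1).foldl (fun st x =>
      (PySem.List.pyRange 1 19 1).foldl (fun st y =>
        let nivel_de_alerta := pvSumAlert sensores x y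
        if nivel_de_alerta > st.1 then (nivel_de_alerta, (x, y)) else st) st)
      ((0 : Int), ((0 : Int), (0 : Int)))
  let nivel_max_alerta := st.1
  let cordenada_max_alerta := st.2
  let distancia := |cordenada_max_alerta.1| + |cordenada_max_alerta.2|
  let activar_protocolo := decide (nivel_max_alerta > 20)
  (cordenada_max_alerta, nivel_max_alerta, distancia, activar_protocolo)

-- ===== PORT B =====
-- one sensor's scatter step: add val to the dict entry of each of the 9 surrounding centers
def pvStamp (acc : PySem.Dict (Int × Int) Int) (sensor : List Int) : PySem.Dict (Int × Int) Int :=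
  let sx := PySem.List.pyGetD sensor 0 0
  let sy := PySem.List.pyGetD sensor 1 0
  let val := PySem.List.pyGetD sensor 2 0
  ([-1, 0, 1] : List Int).foldl (fun acc dx =>
    ([-1, 0, 1] : List Int).foldl (fun acc dy =>
      let cell := (sx + dx, sy + dy)
      acc.insert cell (acc.getD cell 0 + val)) acc) acc

def sistema_seguridad_baticueva_alt (sensores : List (List Int)) : (Int × Int) × Int × Int × Bool :=
  let acc := sensores.foldl pvStamp PySem.Dict.empty
  let cand := acc.items.filter (fun p =>
    decide (1 ≤ p.1.1 ∧ p.1.1 ≤ 18 ∧ 1 ≤ p.1.2 ∧ p.1.2 ≤ 18 ∧ 0 < p.2))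
  let cn : (Int × Int) × Int :=
    if cand = [] then ((0, 0), 0)
    else
      let nivel := (PySem.List.max? (cand.map (fun p => p.2)) (fun v => v)).getD 0
      let x0 : Int := (PySem.List.min? ((cand.filter (fun p => decide (p.2 = nivel))).map
                  (fun p => p.1.1)) (fun v => v)).getD 0
      let y0 : Int := (PySem.List.min? ((cand.filter (fun p =>
                  decide (p.2 = nivel) && decide (p.1.1 = x0))).map
                  (fun p => p.1.2)) (fun v => v)).getD 0
      ((x0, y0), nivel)
  let distancia := |cn.1.1| + |cn.1.2|
  (cn.1, cn.2, distancia, decide (cn.2 > 20))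

-- ===== PRECONDITION & SPEC =====
-- Pre_ excludes sensor rows shorter than 3 elements: Python A raises IndexError on them except when the
-- short-circuit of `sensor[0] == x and sensor[1] == y` never reaches the missing element (coords outside 0..19),
-- in which case A returns only by that accident of evaluation order; B indexes all three elements and raises.
def Pre_sistema_seguridad_baticueva (sensores : List (List Int)) : Prop :=
  ∀ s ∈ sensores, 3 ≤ s.length
instance (sensores : List (List Int)) : Decidable (Pre_sistema_seguridad_baticueva sensores) := by
  unfold Pre_sistema_seguridad_baticueva; infer_instance
def pvWitness_sistema_seguridad_baticueva : List (List Int) := [[5, 5, 30], [6, 5, -2]]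
def Spec_sistema_seguridad_baticueva (sensores : List (List Int)) (out : (Int × Int) × Int × Int × Bool) : Prop := out = sistema_seguridad_baticueva_alt sensores
instance (sensores : List (List Int)) (out : (Int × Int) × Int × Int × Bool) : Decidable (Spec_sistema_seguridad_baticueva sensores out) := by unfold Spec_sistema_seguridad_baticueva; infer_instance

-- ===== CLAIM (what is proved, stated in full; the proofs are below) =====
def Claim_equal_sistema_seguridad_baticueva : Prop := ∀ (sensores : List (List Int)), Dom_sistema_seguridad_baticueva sensores → Pre_sistema_seguridad_baticueva sensores → Spec_sistema_seguridad_baticueva sensores (sistema_seguridad_baticueva sensores)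

-- ===== LEMMAS AND PROOFS =====

-- the window sum both programs compute per center, as a single sum over the sensors
def pvContrib (sensores : List (List Int)) (x y : Int) : Int :=
  (sensores.map (fun s =>
    if x - 1 ≤ PySem.List.pyGetD s 0 0 ∧ PySem.List.pyGetD s 0 0 ≤ x + 1 ∧
       y - 1 ≤ PySem.List.pyGetD s 1 0 ∧ PySem.List.pyGetD s 1 0 ≤ y + 1 then
      PySem.List.pyGetD s 2 0
    else 0)).sum

lemma pvRange_window (a : Int) : PySem.List.pyRange (a - 1) (a + 2) 1 = [a - 1, a, a + 1] := by
  rw [PySem.List.pyRange_one]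
  have h : (a + 2 - (a - 1)).toNat = 3 := by omega
  rw [h]
  simp [List.range_succ]
  omega

lemma pv_foldl_if_add {α : Type} (l : List α) (p : α → Prop) [DecidablePred p]
    (v : α → Int) (t : Int) :
    l.foldl (fun total s => if p s then total + v s else total) t
      = t + (l.map (fun s => if p s then v s else 0)).sum := by
  have h : (fun (total : Int) s => if p s then total + v s else total)
       = fun total s => total + (if p s then v s else 0) := by
    funext total s; split <;> simp
  rw [h, PySem.List.foldl_add]

-- indicator decomposition of a two-coordinate ite
lemma pv_ind_mul (p q : Prop) [Decidable p] [Decidable q] (v : Int) :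
    (if p ∧ q then v else 0) = (if p then (1 : Int) else 0) * ((if q then 1 else 0) * v) := by
  split_ifs <;> simp_all

-- one-dimensional indicator sums (gather form: `coord = center offset`)
lemma pv_ind3_gather (a x : Int) :
    (if a = x - 1 then (1 : Int) else 0) + ((if a = x then 1 else 0) + (if a = x + 1 then 1 else 0))
      = if x - 1 ≤ a ∧ a ≤ x + 1 then 1 else 0 := by
  split_ifs <;> omega

-- one-dimensional indicator sums (scatter form: `center = coord + offset`)
lemma pv_ind3_scatter (a x : Int) :
    (if x = a + -1 then (1 : Int) else 0) + ((if x = a + 0 then 1 else 0) + (if x = a + 1 then 1 else 0))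
      = if x - 1 ≤ a ∧ a ≤ x + 1 then 1 else 0 := by
  split_ifs <;> omega

lemma pv_window_mul (a b v x y : Int) :
    (if x - 1 ≤ a ∧ a ≤ x + 1 then (1 : Int) else 0) * ((if y - 1 ≤ b ∧ b ≤ y + 1 then 1 else 0) * v)
      = if x - 1 ≤ a ∧ a ≤ x + 1 ∧ y - 1 ≤ b ∧ b ≤ y + 1 then v else 0 := by
  split_ifs <;> omega

-- the nine gather-side cell tests collapse to the window test
lemma pv_nine_gather (a b v x y : Int) :
    (if a = x - 1 ∧ b = y - 1 then v else 0) + (if a = x - 1 ∧ b = y then v else 0) +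
    (if a = x - 1 ∧ b = y + 1 then v else 0) + (if a = x ∧ b = y - 1 then v else 0) +
    (if a = x ∧ b = y then v else 0) + (if a = x ∧ b = y + 1 then v else 0) +
    (if a = x + 1 ∧ b = y - 1 then v else 0) + (if a = x + 1 ∧ b = y then v else 0) +
    (if a = x + 1 ∧ b = y + 1 then v else 0)
      = if x - 1 ≤ a ∧ a ≤ x + 1 ∧ y - 1 ≤ b ∧ b ≤ y + 1 then v else 0 := by
  rw [← pv_window_mul a b v x y, ← pv_ind3_gather a x, ← pv_ind3_gather b y]
  simp only [pv_ind_mul]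
  ring

-- the nine scatter-side cell tests collapse to the window test
lemma pv_nine_scatter (a b v x y : Int) :
    (if x = a + -1 ∧ y = b + -1 then v else 0) + (if x = a + -1 ∧ y = b + 0 then v else 0) +
    (if x = a + -1 ∧ y = b + 1 then v else 0) + (if x = a + 0 ∧ y = b + -1 then v else 0) +
    (if x = a + 0 ∧ y = b + 0 then v else 0) + (if x = a + 0 ∧ y = b + 1 then v else 0) +
    (if x = a + 1 ∧ y = b + -1 then v else 0) + (if x = a + 1 ∧ y = b + 0 then v else 0) +
    (if x = a + 1 ∧ y = b + 1 then v else 0)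
      = if x - 1 ≤ a ∧ a ≤ x + 1 ∧ y - 1 ≤ b ∧ b ≤ y + 1 then v else 0 := by
  rw [← pv_window_mul a b v x y, ← pv_ind3_scatter a x, ← pv_ind3_scatter b y]
  simp only [pv_ind_mul]
  ring

lemma pvSumAlert_eq_contrib (sensores : List (List Int)) (x y : Int) :
    pvSumAlert sensores x y = pvContrib sensores x y := by
  unfold pvSumAlert
  rw [pvRange_window x, pvRange_window y]
  simp only [List.foldl_cons, List.foldl_nil]
  simp only [pv_foldl_if_add, zero_add]
  simp only [← PySem.List.sum_map_add_int]
  unfold pvContrib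
  congr 1
  apply List.map_congr_left
  intro s _
  rw [← pv_nine_gather (PySem.List.pyGetD s 0 0) (PySem.List.pyGetD s 1 0)
        (PySem.List.pyGetD s 2 0) x y]

lemma pv_getD_insert_add (d : PySem.Dict (Int × Int) Int) (k c : Int × Int) (v : Int) :
    (d.insert k (d.getD k 0 + v)).getD c 0 = d.getD c 0 + (if c = k then v else 0) := by
  by_cases h : c = k
  · subst h; rw [PySem.Dict.getD_insert_self]; simp
  · rw [PySem.Dict.getD_insert_of_ne _ _ _ h]; simp [h]

lemma pv_getD_stampRow (sx sy v dx : Int) (dys : List Int)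
    (d : PySem.Dict (Int × Int) Int) (c : Int × Int) :
    (dys.foldl (fun acc dy =>
        acc.insert (sx + dx, sy + dy) (acc.getD (sx + dx, sy + dy) 0 + v)) d).getD c 0
      = d.getD c 0 + (dys.map (fun dy => if c = (sx + dx, sy + dy) then v else 0)).sum := by
  induction dys generalizing d with
  | nil => simp
  | cons dy t ih =>
      rw [List.foldl_cons, ih, pv_getD_insert_add, List.map_cons, List.sum_cons]
      ring

lemma pv_getD_stampAll (sx sy v : Int) (dys dxs : List Int)
    (d : PySem.Dict (Int × Int) Int) (c : Int × Int) :
    (dxs.foldl (fun acc dx => dys.foldl (fun acc dy =>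
        acc.insert (sx + dx, sy + dy) (acc.getD (sx + dx, sy + dy) 0 + v)) acc) d).getD c 0
      = d.getD c 0 +
        (dxs.map (fun dx =>
          (dys.map (fun dy => if c = (sx + dx, sy + dy) then v else 0)).sum)).sum := by
  induction dxs generalizing d with
  | nil => simp
  | cons dx t ih =>
      rw [List.foldl_cons, ih, pv_getD_stampRow, List.map_cons, List.sum_cons]
      ring

lemma pv_getD_stamp (d : PySem.Dict (Int × Int) Int) (s : List Int) (x y : Int) :
    (pvStamp d s).getD (x, y) 0
      = d.getD (x, y) 0 +
        (if x - 1 ≤ PySem.List.pyGetD s 0 0 ∧ PySem.List.pyGetD s 0 0 ≤ x + 1 ∧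
            y - 1 ≤ PySem.List.pyGetD s 1 0 ∧ PySem.List.pyGetD s 1 0 ≤ y + 1 then
          PySem.List.pyGetD s 2 0
        else 0) := by
  unfold pvStamp
  rw [pv_getD_stampAll]
  congr 1
  simp only [List.map_cons, List.map_nil, List.sum_cons, List.sum_nil, add_zero, Prod.mk.injEq]
  rw [← pv_nine_scatter (PySem.List.pyGetD s 0 0) (PySem.List.pyGetD s 1 0)
        (PySem.List.pyGetD s 2 0) x y]
  ring_nf

lemma pv_getD_scatter (sensores : List (List Int)) (d : PySem.Dict (Int × Int) Int) (x y : Int) :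
    (sensores.foldl pvStamp d).getD (x, y) 0 = d.getD (x, y) 0 + pvContrib sensores x y := by
  induction sensores generalizing d with
  | nil => simp [pvContrib]
  | cons s rest ih =>
      rw [List.foldl_cons, ih, pv_getD_stamp]
      unfold pvContrib
      rw [List.map_cons, List.sum_cons]
      ring

-- value of the accumulator dict at any cell
lemma pv_acc_getD (sensores : List (List Int)) (x y : Int) :
    (sensores.foldl pvStamp PySem.Dict.empty).getD (x, y) 0 = pvContrib sensores x y := by
  rw [pv_getD_scatter]; simp [PySem.Dict.empty, PySem.Dict.getD, PySem.Dict.get?]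


-- mem keys ↔ positive value machinery
lemma pv_mem_keys_of_getD_ne (d : PySem.Dict (Int × Int) Int) (k : Int × Int)
    (h : d.getD k 0 ≠ 0) : k ∈ d.keys := by
  by_cases hc : d.contains k = true
  · exact (PySem.Dict.contains_iff_mem_keys d k).1 hc
  · exfalso; apply h
    have hc' : d.contains k = false := by simpa using hc
    simp [PySem.Dict.get?_eq_none_iff_contains, hc', PySem.Dict.getD_of_get?_eq_none]

lemma pv_stampAll_nodup (sx sy v : Int) (dys dxs : List Int)
    (d : PySem.Dict (Int × Int) Int) (h : d.keys.Nodup) :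
    (dxs.foldl (fun acc dx => dys.foldl (fun acc dy =>
        acc.insert (sx + dx, sy + dy) (acc.getD (sx + dx, sy + dy) 0 + v)) acc) d).keys.Nodup := by
  induction dxs generalizing d with
  | nil => simpa using h
  | cons dx t ih =>
      rw [List.foldl_cons]
      exact ih _ (PySem.Dict.nodup_keys_foldl_insert_key _ _ _ _ h)

lemma pvStamp_nodup (d : PySem.Dict (Int × Int) Int) (s : List Int)
    (h : d.keys.Nodup) : (pvStamp d s).keys.Nodup := by
  unfold pvStamp
  exact pv_stampAll_nodup _ _ _ _ _ d h

lemma pv_acc_nodup (sensores : List (List Int)) (d : PySem.Dict (Int × Int) Int)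
    (h : d.keys.Nodup) : (sensores.foldl pvStamp d).keys.Nodup := by
  induction sensores generalizing d with
  | nil => simpa using h
  | cons s rest ih => rw [List.foldl_cons]; exact ih _ (pvStamp_nodup d s h)

-- A's running-max loop, abstractly
def pvStep (f : Int × Int → Int) (st : Int × (Int × Int)) (c : Int × Int) : Int × (Int × Int) :=
  if f c > st.1 then (f c, c) else st

def pvBest (f : Int × Int → Int) : List (Int × Int) → Option (Int × (Int × Int))
  | [] => none
  | c :: t =>
      match pvBest f t with
      | none => some (f c, c)
      | some p => if p.1 ≤ f c then some (f c, c) else some p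

lemma pvBest_none_iff (f : Int × Int → Int) (gs : List (Int × Int)) :
    pvBest f gs = none ↔ gs = [] := by
  cases gs with
  | nil => simp [pvBest]
  | cons c t =>
      simp only [pvBest]
      cases pvBest f t with
      | none => simp
      | some p => by_cases h : p.1 ≤ f c <;> simp [h]

lemma pvBest_foldl (f : Int × Int → Int) (gs : List (Int × Int)) (st : Int × (Int × Int)) :
    gs.foldl (pvStep f) st
      = match pvBest f gs with
        | none => st
        | some p => if st.1 < p.1 then p else st := by
  induction gs generalizing st with
  | nil => simp [pvBest]
  | cons c t ih =>
      rw [List.foldl_cons, ih]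
      simp only [pvBest]
      cases hq : pvBest f t with
      | none => by_cases h1 : st.1 < f c <;> simp [pvStep, h1]
      | some q =>
          by_cases h1 : st.1 < f c <;> by_cases h2 : q.1 ≤ f c <;>
            simp only [pvStep, gt_iff_lt, h1, h2, if_true, if_false] <;>
            split_ifs <;> first | rfl | omega

lemma pvBest_mem (f : Int × Int → Int) (gs : List (Int × Int)) (p : Int × (Int × Int))
    (h : pvBest f gs = some p) : p.2 ∈ gs ∧ f p.2 = p.1 := by
  induction gs generalizing p with
  | nil => simp [pvBest] at h
  | cons c t ih =>
      simp only [pvBest] at h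
      cases hq : pvBest f t with
      | none => rw [hq] at h; dsimp only at h; cases h; simp
      | some q =>
          rw [hq] at h; dsimp only at h
          by_cases h2 : q.1 ≤ f c
          · rw [if_pos h2] at h; cases h; simp
          · rw [if_neg h2] at h
            obtain rfl := Option.some.inj h
            rcases ih _ hq with ⟨hm, hf⟩
            exact ⟨List.mem_cons_of_mem _ hm, hf⟩

lemma pvBest_max (f : Int × Int → Int) (gs : List (Int × Int)) (p : Int × (Int × Int))
    (h : pvBest f gs = some p) : ∀ c ∈ gs, f c ≤ p.1 := by
  induction gs generalizing p with
  | nil => simp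
  | cons c t ih =>
      simp only [pvBest] at h
      cases hq : pvBest f t with
      | none =>
          rw [hq] at h; dsimp only at h; cases h
          intro e he
          rcases List.mem_cons.1 he with rfl | he
          · exact le_refl _
          · rw [pvBest_none_iff] at hq; subst hq; simp at he
      | some q =>
          rw [hq] at h; dsimp only at h
          by_cases h2 : q.1 ≤ f c
          · rw [if_pos h2] at h; cases h
            intro e he
            rcases List.mem_cons.1 he with rfl | he
            · exact le_refl _
            · exact le_trans (ih q hq e he) h2
          · rw [if_neg h2] at h
            obtain rfl := Option.some.inj h
            intro e he
            rcases List.mem_cons.1 he with rfl | he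
            · omega
            · exact ih _ hq e he

lemma pvBest_first {R : Int × Int → Int × Int → Prop} (f : Int × Int → Int)
    (gs : List (Int × Int)) (p : Int × (Int × Int)) (hp : gs.Pairwise R)
    (h : pvBest f gs = some p) : ∀ c ∈ gs, f c = p.1 → p.2 = c ∨ R p.2 c := by
  induction gs generalizing p with
  | nil => simp
  | cons c t ih =>
      rcases List.pairwise_cons.1 hp with ⟨hc, ht⟩
      simp only [pvBest] at h
      cases hq : pvBest f t with
      | none =>
          rw [hq] at h; dsimp only at h; cases h
          intro e he _
          rcases List.mem_cons.1 he with rfl | he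
          · exact Or.inl rfl
          · exact Or.inr (hc e he)
      | some q =>
          rw [hq] at h; dsimp only at h
          by_cases h2 : q.1 ≤ f c
          · rw [if_pos h2] at h; cases h
            intro e he _
            rcases List.mem_cons.1 he with rfl | he
            · exact Or.inl rfl
            · exact Or.inr (hc e he)
          · rw [if_neg h2] at h
            obtain rfl := Option.some.inj h
            intro e he hfe
            rcases List.mem_cons.1 he with rfl | he
            · omega
            · exact ih _ ht hq e he hfe

-- the row-major grid A iterates, flattened
def pvGrid : List (Int × Int) :=
  (PySem.List.pyRange 1 19 1).flatMap (fun x => (PySem.List.pyRange 1 19 1).map (fun y => (x, y)))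

def pvLex (a b : Int × Int) : Prop := a.1 < b.1 ∨ (a.1 = b.1 ∧ a.2 < b.2)

lemma pv_mem_grid (c : Int × Int) :
    c ∈ pvGrid ↔ 1 ≤ c.1 ∧ c.1 ≤ 18 ∧ 1 ≤ c.2 ∧ c.2 ≤ 18 := by
  obtain ⟨x, y⟩ := c
  simp only [pvGrid, List.mem_flatMap, List.mem_map, PySem.List.mem_pyRange_one, Prod.mk.injEq]
  constructor
  · rintro ⟨a, ⟨h1, h2⟩, b, ⟨h3, h4⟩, rfl, rfl⟩; omega
  · rintro ⟨h1, h2, h3, h4⟩; exact ⟨x, by omega, y, by omega, rfl, rfl⟩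

lemma pv_range_pairwise : (PySem.List.pyRange 1 19 1).Pairwise (· < ·) := by
  rw [PySem.List.pyRange_one]
  exact List.pairwise_map.2 (List.pairwise_lt_range.imp (by intro a b h; omega))

lemma pv_grid_pairwise : pvGrid.Pairwise pvLex := by
  apply List.pairwise_flatMap.2
  constructor
  · intro a _
    exact List.pairwise_map.2 (pv_range_pairwise.imp (by intro u v h; exact Or.inr ⟨rfl, h⟩))
  · apply pv_range_pairwise.imp
    intro a b hab
    simp only [List.mem_map]
    rintro x ⟨u, _, rfl⟩ y ⟨v, _, rfl⟩
    exact Or.inl hab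

-- A's nested grid fold is the abstract loop over pvGrid
lemma pv_A_fold (sensores : List (List Int)) :
    ((PySem.List.pyRange 1 19 1).foldl (fun st x =>
      (PySem.List.pyRange 1 19 1).foldl (fun st y =>
        let nivel_de_alerta := pvSumAlert sensores x y
        if nivel_de_alerta > st.1 then (nivel_de_alerta, (x, y)) else st) st)
      ((0 : Int), ((0 : Int), (0 : Int))))
      = pvGrid.foldl (pvStep (fun c => pvContrib sensores c.1 c.2))
          ((0 : Int), ((0 : Int), (0 : Int))) := by
  simp only [pvGrid, List.foldl_flatMap, List.foldl_map, pvStep, pvSumAlert_eq_contrib]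

-- membership in B's candidate list, characterised by the window sum
lemma pv_mem_cand (sensores : List (List Int)) (p : (Int × Int) × Int) :
    p ∈ ((sensores.foldl pvStamp PySem.Dict.empty).items.filter (fun p =>
          decide (1 ≤ p.1.1 ∧ p.1.1 ≤ 18 ∧ 1 ≤ p.1.2 ∧ p.1.2 ≤ 18 ∧ 0 < p.2)))
      ↔ p.2 = pvContrib sensores p.1.1 p.1.2 ∧ 0 < p.2 ∧
        1 ≤ p.1.1 ∧ p.1.1 ≤ 18 ∧ 1 ≤ p.1.2 ∧ p.1.2 ≤ 18 := by
  have hnd : (sensores.foldl pvStamp PySem.Dict.empty).keys.Nodup :=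
    pv_acc_nodup sensores PySem.Dict.empty (by simp [PySem.Dict.empty, PySem.Dict.keys])
  rw [PySem.Dict.items_eq_map_keys _ hnd 0]
  simp only [List.mem_filter, List.mem_map, decide_eq_true_eq]
  constructor
  · rintro ⟨⟨k, hk, rfl⟩, hb⟩
    refine ⟨?_, hb.2.2.2.2, hb.1, hb.2.1, hb.2.2.1, hb.2.2.2.1⟩
    exact pv_acc_getD sensores k.1 k.2
  · rintro ⟨hv, hpos, h1, h2, h3, h4⟩
    have hget : (sensores.foldl pvStamp PySem.Dict.empty).getD p.1 0 = p.2 := by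
      rw [pv_acc_getD sensores p.1.1 p.1.2, hv]
    refine ⟨⟨p.1, ?_, ?_⟩, h1, h2, h3, h4, hpos⟩
    · apply pv_mem_keys_of_getD_ne
      rw [hget]; omega
    · rw [hget]

-- ===== VERDICT (by name: the statement is the Claim_ definition above) =====
theorem sistema_seguridad_baticueva_spec : Claim_equal_sistema_seguridad_baticueva := by
  intro sensores _ _
  unfold Spec_sistema_seguridad_baticueva
  unfold sistema_seguridad_baticueva sistema_seguridad_baticueva_alt
  rw [pv_A_fold sensores, pvBest_foldl]
  cases hb : pvBest (fun c => pvContrib sensores c.1 c.2) pvGrid with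
  | none =>
      rw [pvBest_none_iff] at hb
      have h11 : ((1 : Int), (1 : Int)) ∈ pvGrid := (pv_mem_grid _).2 (by norm_num)
      rw [hb] at h11; simp at h11
  | some p =>
      obtain ⟨hpmem, hpf⟩ := pvBest_mem _ _ _ hb
      have hmax := pvBest_max _ _ _ hb
      have hfirst := pvBest_first _ _ _ pv_grid_pairwise hb
      obtain ⟨hg1, hg2, hg3, hg4⟩ := (pv_mem_grid _).1 hpmem
      by_cases hpos : 0 < p.1
      · -- a positive best cell exists: both sides return (p.2, p.1, …)
        have hq0 : (p.2, p.1) ∈ ((sensores.foldl pvStamp PySem.Dict.empty).items.filter (fun r =>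
            decide (1 ≤ r.1.1 ∧ r.1.1 ≤ 18 ∧ 1 ≤ r.1.2 ∧ r.1.2 ≤ 18 ∧ 0 < r.2))) :=
          (pv_mem_cand sensores (p.2, p.1)).2 ⟨hpf.symm, hpos, hg1, hg2, hg3, hg4⟩
        have hne : ((sensores.foldl pvStamp PySem.Dict.empty).items.filter (fun r =>
            decide (1 ≤ r.1.1 ∧ r.1.1 ≤ 18 ∧ 1 ≤ r.1.2 ∧ r.1.2 ≤ 18 ∧ 0 < r.2))) ≠ [] := by
          intro h; rw [h] at hq0; simp at hq0
        -- the max of the candidate values is p.1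
        have hniv : (PySem.List.max? (((sensores.foldl pvStamp PySem.Dict.empty).items.filter (fun r =>
            decide (1 ≤ r.1.1 ∧ r.1.1 ≤ 18 ∧ 1 ≤ r.1.2 ∧ r.1.2 ≤ 18 ∧ 0 < r.2))).map
              (fun r => r.2)) (fun v => v)).getD 0 = p.1 := by
          cases hm : PySem.List.max? (((sensores.foldl pvStamp PySem.Dict.empty).items.filter (fun r =>
              decide (1 ≤ r.1.1 ∧ r.1.1 ≤ 18 ∧ 1 ≤ r.1.2 ∧ r.1.2 ≤ 18 ∧ 0 < r.2))).map
                (fun r => r.2)) (fun v => v) with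
          | none =>
              rw [PySem.List.max?_eq_none_iff, List.map_eq_nil_iff] at hm
              exact absurd hm hne
          | some m =>
              have hmem' := PySem.List.max?_mem hm
              rw [List.mem_map] at hmem'
              obtain ⟨r, hr, rfl⟩ := hmem'
              obtain ⟨hv, hrpos, b1, b2, b3, b4⟩ := (pv_mem_cand sensores r).1 hr
              have hle : r.2 ≤ p.1 := by
                have := hmax r.1 ((pv_mem_grid _).2 ⟨b1, b2, b3, b4⟩); omega
              have hge := PySem.List.max?_isMax hm p.1
                (List.mem_map.2 ⟨(p.2, p.1), hq0, rfl⟩)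
              simp only [Option.getD_some]
              omega
        -- the min x among max-level candidates is p.2.1
        have hx0 : (PySem.List.min? ((((sensores.foldl pvStamp PySem.Dict.empty).items.filter (fun r =>
            decide (1 ≤ r.1.1 ∧ r.1.1 ≤ 18 ∧ 1 ≤ r.1.2 ∧ r.1.2 ≤ 18 ∧ 0 < r.2))).filter (fun r =>
              decide (r.2 = p.1))).map (fun r => r.1.1)) (fun v => v)).getD 0 = p.2.1 := by
          have hqf : (p.2, p.1) ∈ (((sensores.foldl pvStamp PySem.Dict.empty).items.filter (fun r =>
              decide (1 ≤ r.1.1 ∧ r.1.1 ≤ 18 ∧ 1 ≤ r.1.2 ∧ r.1.2 ≤ 18 ∧ 0 < r.2))).filter (fun r =>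
                decide (r.2 = p.1))) := List.mem_filter.2 ⟨hq0, by simp⟩
          cases hm : PySem.List.min? ((((sensores.foldl pvStamp PySem.Dict.empty).items.filter (fun r =>
              decide (1 ≤ r.1.1 ∧ r.1.1 ≤ 18 ∧ 1 ≤ r.1.2 ∧ r.1.2 ≤ 18 ∧ 0 < r.2))).filter (fun r =>
                decide (r.2 = p.1))).map (fun r => r.1.1)) (fun v => v) with
          | none =>
              rw [PySem.List.min?_eq_none_iff, List.map_eq_nil_iff,
                List.eq_nil_iff_forall_not_mem] at hm
              exact absurd hqf (hm _)
          | some mx =>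
              have hmem' := PySem.List.min?_mem hm
              rw [List.mem_map] at hmem'
              obtain ⟨r, hr, rfl⟩ := hmem'
              obtain ⟨hrc, hrv⟩ := List.mem_filter.1 hr
              rw [decide_eq_true_eq] at hrv
              obtain ⟨hv, hrpos, b1, b2, b3, b4⟩ := (pv_mem_cand sensores r).1 hrc
              have hfr := hfirst r.1 ((pv_mem_grid _).2 ⟨b1, b2, b3, b4⟩) (by omega)
              have hle : p.2.1 ≤ r.1.1 := by
                rcases hfr with heq | hlex
                · rw [heq]
                · unfold pvLex at hlex
                  rcases hlex with h | ⟨h, _⟩ <;> omega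
              have hge := PySem.List.min?_isMin hm p.2.1 (List.mem_map.2 ⟨(p.2, p.1), hqf, rfl⟩)
              simp only [Option.getD_some]
              omega
        -- the min y among max-level candidates in column p.2.1 is p.2.2
        have hy0 : (PySem.List.min? ((((sensores.foldl pvStamp PySem.Dict.empty).items.filter (fun r =>
            decide (1 ≤ r.1.1 ∧ r.1.1 ≤ 18 ∧ 1 ≤ r.1.2 ∧ r.1.2 ≤ 18 ∧ 0 < r.2))).filter (fun r =>
              decide (r.2 = p.1) && decide (r.1.1 = p.2.1))).map (fun r => r.1.2)) (fun v => v)).getD 0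
            = p.2.2 := by
          have hqf : (p.2, p.1) ∈ (((sensores.foldl pvStamp PySem.Dict.empty).items.filter (fun r =>
              decide (1 ≤ r.1.1 ∧ r.1.1 ≤ 18 ∧ 1 ≤ r.1.2 ∧ r.1.2 ≤ 18 ∧ 0 < r.2))).filter (fun r =>
                decide (r.2 = p.1) && decide (r.1.1 = p.2.1))) := List.mem_filter.2 ⟨hq0, by simp⟩
          cases hm : PySem.List.min? ((((sensores.foldl pvStamp PySem.Dict.empty).items.filter (fun r =>
              decide (1 ≤ r.1.1 ∧ r.1.1 ≤ 18 ∧ 1 ≤ r.1.2 ∧ r.1.2 ≤ 18 ∧ 0 < r.2))).filter (fun r =>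
                decide (r.2 = p.1) && decide (r.1.1 = p.2.1))).map (fun r => r.1.2)) (fun v => v) with
          | none =>
              rw [PySem.List.min?_eq_none_iff, List.map_eq_nil_iff,
                List.eq_nil_iff_forall_not_mem] at hm
              exact absurd hqf (hm _)
          | some my =>
              have hmem' := PySem.List.min?_mem hm
              rw [List.mem_map] at hmem'
              obtain ⟨r, hr, rfl⟩ := hmem'
              obtain ⟨hrc, hrv⟩ := List.mem_filter.1 hr
              rw [Bool.and_eq_true, decide_eq_true_eq, decide_eq_true_eq] at hrv
              obtain ⟨hv, hrpos, b1, b2, b3, b4⟩ := (pv_mem_cand sensores r).1 hrc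
              have hfr := hfirst r.1 ((pv_mem_grid _).2 ⟨b1, b2, b3, b4⟩) (by omega)
              have hle : p.2.2 ≤ r.1.2 := by
                rcases hfr with heq | hlex
                · rw [heq]
                · unfold pvLex at hlex
                  rcases hlex with h | ⟨h, h'⟩ <;> omega
              have hge := PySem.List.min?_isMin hm p.2.2 (List.mem_map.2 ⟨(p.2, p.1), hqf, rfl⟩)
              simp only [Option.getD_some]
              omega
        dsimp only
        rw [if_pos hpos, if_neg hne, hniv, hx0, hy0]
      · -- no positive cell: A keeps (0,(0,0)); B's candidate list is empty
        have hcand : (((sensores.foldl pvStamp PySem.Dict.empty).items.filter (fun p =>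
            decide (1 ≤ p.1.1 ∧ p.1.1 ≤ 18 ∧ 1 ≤ p.1.2 ∧ p.1.2 ≤ 18 ∧ 0 < p.2)))) = [] := by
          rw [List.eq_nil_iff_forall_not_mem]
          intro q hq
          rw [pv_mem_cand] at hq
          obtain ⟨hv, hqpos, b1, b2, b3, b4⟩ := hq
          have : pvContrib sensores q.1.1 q.1.2 ≤ p.1 :=
            hmax q.1 ((pv_mem_grid _).2 ⟨b1, b2, b3, b4⟩)
          omega
        simp [hpos, if_pos hcand]
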